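-- pv_equiv track=rewrite | github.com/ikustow/bio_seq_project | backend/agents_core/session_agent/services/graph.py | ensure_read_only_cypher
-- ===== SOURCE A (Python) =====
-- def ensure_read_only_cypher(query: str) -> str:
--     normalized = " ".join(query.strip().split())
--     lowered = normalized.lower()
--     forbidden = [
--         " create ",
--         " merge ",
--         " delete ",
--         " detach ",
--         " set ",
--         " remove ",
--         " drop ",
--         " load csv ",
--         " call dbms ",
--         " call apoc.",
--     ]
--     if any(token in f" {lowered} " for token in forbidden):
--         raise ValueError("Only read-only Cypher queries are allowed.")
--     if not lowered.startswith(("match", "optional match", "with", "call")):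
--         raise ValueError("Cypher query must start with MATCH, OPTIONAL MATCH, WITH, or CALL.")
--     return normalized
-- ===== SOURCE B (Python) =====
-- FORBIDDEN_WORDS = frozenset({"create", "merge", "delete", "detach", "set", "remove", "drop"})
-- FORBIDDEN_PAIRS = frozenset({("load", "csv"), ("call", "dbms")})
--
--
-- def ensure_read_only_cypher(query: str) -> str:
--     words = query.split()
--     low = [w.lower() for w in words]
--     if any(w in FORBIDDEN_WORDS for w in low):
--         raise ValueError("Only read-only Cypher queries are allowed.")
--     for first, second in zip(low, low[1:]):
--         if (first, second) in FORBIDDEN_PAIRS or (first == "call" and second.startswith("apoc.")):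
--             raise ValueError("Only read-only Cypher queries are allowed.")
--     starts_ok = bool(low) and (
--         low[0].startswith(("match", "with", "call"))
--         or (low[0] == "optional" and len(low) > 1 and low[1].startswith("match"))
--     )
--     if not starts_ok:
--         raise ValueError("Cypher query must start with MATCH, OPTIONAL MATCH, WITH, or CALL.")
--     return " ".join(words)
-- ===== Notes on version B (the rewrite author's own statement) =====
-- stated objective: idiomatic
-- what changed: B splits the query into words once and validates word-by-word (a frozenset membership test for single forbidden keywords, a scan of adjacent word pairs for 'load csv'/'call dbms'/'call apoc.*', and a word-level start check) instead of A's ten substring scans over the space-padded re-joined lowered string.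
import Mathlib
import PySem

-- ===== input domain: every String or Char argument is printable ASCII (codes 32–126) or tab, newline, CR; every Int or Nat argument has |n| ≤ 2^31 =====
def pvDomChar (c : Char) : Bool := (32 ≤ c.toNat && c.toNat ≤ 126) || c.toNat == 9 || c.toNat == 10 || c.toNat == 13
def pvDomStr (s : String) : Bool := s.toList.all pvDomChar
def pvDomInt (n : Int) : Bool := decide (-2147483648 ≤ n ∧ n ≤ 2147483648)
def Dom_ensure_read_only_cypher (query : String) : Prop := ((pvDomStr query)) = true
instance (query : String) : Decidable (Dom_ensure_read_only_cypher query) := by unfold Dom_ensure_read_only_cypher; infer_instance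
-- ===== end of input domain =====

-- B validates word-by-word (split once, check words and adjacent word pairs) instead of A's
-- substring scans over the padded re-joined string; objective: simpler/idiomatic.
-- Both programs raise ValueError on rejected queries; those inputs are outside Pre_.

-- ===== PORT A =====
def pvForbiddenA : List (List Char) :=
  [" create ".toList, " merge ".toList, " delete ".toList, " detach ".toList,
   " set ".toList, " remove ".toList, " drop ".toList,
   " load csv ".toList, " call dbms ".toList, " call apoc.".toList]

def ensure_read_only_cypher (query : String) : String :=
  let normalized := PySem.Chars.join [' '] (PySem.Chars.split₀ (PySem.Chars.strip query.toList))
  let lowered := PySem.Chars.lower normalized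
  if pvForbiddenA.any (fun t => PySem.Chars.isIn t ([' '] ++ lowered ++ [' '])) then
    ""  -- raise ValueError: outside Pre_
  else if !(PySem.Chars.startswith lowered "match".toList
         || PySem.Chars.startswith lowered "optional match".toList
         || PySem.Chars.startswith lowered "with".toList
         || PySem.Chars.startswith lowered "call".toList) then
    ""  -- raise ValueError: outside Pre_
  else String.ofList normalized

-- ===== PORT B =====
def pvForbiddenWords : List (List Char) :=
  ["create".toList, "merge".toList, "delete".toList, "detach".toList,
   "set".toList, "remove".toList, "drop".toList]

def pvForbiddenPairs : List (List Char × List Char) :=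
  [("load".toList, "csv".toList), ("call".toList, "dbms".toList)]

def ensure_read_only_cypher_alt (query : String) : String :=
  let words := PySem.Chars.split₀ query.toList
  let low := words.map PySem.Chars.lower
  if low.any (fun w => pvForbiddenWords.contains w) then
    ""  -- raise ValueError: outside Pre_
  else if (low.zip low.tail).any (fun p =>
            pvForbiddenPairs.contains p
            || (p.1 == "call".toList && PySem.Chars.startswith p.2 "apoc.".toList)) then
    ""  -- raise ValueError: outside Pre_
  else
    let startsOk :=
      match low with
      | [] => false
      | w :: rest =>
        PySem.Chars.startswith w "match".toList
        || PySem.Chars.startswith w "with".toList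
        || PySem.Chars.startswith w "call".toList
        || (w == "optional".toList
            && (match rest with
                | [] => false
                | v :: _ => PySem.Chars.startswith v "match".toList))
    if !startsOk then
      ""  -- raise ValueError: outside Pre_
    else String.ofList (PySem.Chars.join [' '] words)

-- ===== PRECONDITION & SPEC =====
-- Pre_: exactly the inputs on which Python A returns normally (both ValueError branches excluded).
def Pre_ensure_read_only_cypher (query : String) : Prop :=
  let lowered := PySem.Chars.lower (PySem.Chars.join [' ']
                   (PySem.Chars.split₀ (PySem.Chars.strip query.toList)))
  ([" create ".toList, " merge ".toList, " delete ".toList, " detach ".toList,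
    " set ".toList, " remove ".toList, " drop ".toList,
    " load csv ".toList, " call dbms ".toList, " call apoc.".toList].all
      (fun t => !PySem.Chars.isIn t ([' '] ++ lowered ++ [' ']))) = true ∧
  (PySem.Chars.startswith lowered "match".toList
   || PySem.Chars.startswith lowered "optional match".toList
   || PySem.Chars.startswith lowered "with".toList
   || PySem.Chars.startswith lowered "call".toList) = true

instance (query : String) : Decidable (Pre_ensure_read_only_cypher query) := by
  unfold Pre_ensure_read_only_cypher; infer_instance

def pvWitness_ensure_read_only_cypher : String := "MATCH (n) RETURN n"

def Spec_ensure_read_only_cypher (query : String) (out : String) : Prop := out = ensure_read_only_cypher_alt query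
instance (query : String) (out : String) : Decidable (Spec_ensure_read_only_cypher query out) := by unfold Spec_ensure_read_only_cypher; infer_instance

-- ===== CLAIM (what is proved, stated in full; the proofs are below) =====
def Claim_equal_ensure_read_only_cypher : Prop := ∀ (query : String), Dom_ensure_read_only_cypher query → Pre_ensure_read_only_cypher query → Spec_ensure_read_only_cypher query (ensure_read_only_cypher query)

-- ===== LEMMAS AND PROOFS =====

-- a word is "space-free": it contains no ' ' character
def pvSF (w : List Char) : Prop := ∀ c ∈ w, c ≠ ' '

theorem pvSF_of_all (w : List Char) (h : w.all (fun c => c != ' ') = true) : pvSF w := by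
  intro c hc
  simpa using (List.all_eq_true.mp h) c hc

def pvGoodList (low : List (List Char)) : Prop := ∀ w ∈ low, w ≠ [] ∧ pvSF w

-- ---- split₀ produces nonempty words of non-whitespace characters ----
theorem pvGo_inv (s : List Char) : ∀ (cur : List Char) (acc : List (List Char)),
    (∀ c ∈ cur, PySem.Chars.isspace c = false) →
    (∀ w ∈ acc, w ≠ [] ∧ ∀ c ∈ w, PySem.Chars.isspace c = false) →
    ∀ w ∈ PySem.Chars.split₀.go s cur acc, w ≠ [] ∧ ∀ c ∈ w, PySem.Chars.isspace c = false := by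
  induction s with
  | nil =>
    intro cur acc hcur hacc w hw
    simp only [PySem.Chars.split₀.go] at hw
    by_cases h : cur.isEmpty
    · simp [h] at hw; exact hacc w hw
    · simp [h] at hw
      rcases hw with hw | hw
      · exact hacc w hw
      · subst hw
        constructor
        · simpa [List.isEmpty_iff] using h
        · intro c hc; exact hcur c (List.mem_reverse.mp hc)
  | cons c rest ih =>
    intro cur acc hcur hacc w hw
    simp only [PySem.Chars.split₀.go] at hw
    by_cases hs : PySem.Chars.isspace c
    · by_cases h : cur.isEmpty
      · simp [hs, h] at hw
        exact ih [] acc (by simp) hacc w hw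
      · simp [hs, h] at hw
        refine ih [] (cur.reverse :: acc) (by simp) ?_ w hw
        intro v hv
        rcases List.mem_cons.mp hv with hv | hv
        · subst hv
          exact ⟨by simpa [List.isEmpty_iff] using h,
                 fun d hd => hcur d (List.mem_reverse.mp hd)⟩
        · exact hacc v hv
    · simp [hs] at hw
      refine ih (c :: cur) acc ?_ hacc w hw
      intro d hd
      rcases List.mem_cons.mp hd with hd | hd
      · subst hd; simpa using hs
      · exact hcur d hd

theorem pvSplit₀_words (s : List Char) :
    ∀ w ∈ PySem.Chars.split₀ s, w ≠ [] ∧ ∀ c ∈ w, PySem.Chars.isspace c = false := by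
  intro w hw
  exact pvGo_inv s [] [] (by simp) (by simp) w hw

-- ---- stripping does not change split₀ ----
theorem pvGo_allspace (t : List Char) : ∀ (cur : List Char) (acc : List (List Char)),
    (∀ c ∈ t, PySem.Chars.isspace c = true) →
    PySem.Chars.split₀.go t cur acc = PySem.Chars.split₀.go [] cur acc := by
  induction t with
  | nil => intro cur acc _; rfl
  | cons c rest ih =>
    intro cur acc ht
    have hc : PySem.Chars.isspace c = true := ht c (by simp)
    simp only [PySem.Chars.split₀.go, hc, if_true]
    by_cases h : cur.isEmpty
    · rw [if_pos h, ih [] acc (fun d hd => ht d (by simp [hd]))]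
      simp only [PySem.Chars.split₀.go]
      rw [if_pos h]; simp
    · rw [if_neg h, ih [] (cur.reverse :: acc) (fun d hd => ht d (by simp [hd]))]
      simp only [PySem.Chars.split₀.go]
      rw [if_neg h]; simp

theorem pvGo_append_space (s : List Char) : ∀ (t cur : List Char) (acc : List (List Char)),
    (∀ c ∈ t, PySem.Chars.isspace c = true) →
    PySem.Chars.split₀.go (s ++ t) cur acc = PySem.Chars.split₀.go s cur acc := by
  induction s with
  | nil => intro t cur acc ht; simpa using pvGo_allspace t cur acc ht
  | cons c rest ih =>
    intro t cur acc ht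
    simp only [List.cons_append, PySem.Chars.split₀.go]
    by_cases hc : PySem.Chars.isspace c
    · simp only [hc, if_true]
      by_cases h : cur.isEmpty
      · rw [if_pos h, if_pos h, ih t [] acc ht]
      · rw [if_neg h, if_neg h, ih t [] (cur.reverse :: acc) ht]
    · simp only [hc, Bool.false_eq_true, if_false]
      exact ih t (c :: cur) acc ht

theorem pvGo_lstrip (s : List Char) : ∀ (acc : List (List Char)),
    PySem.Chars.split₀.go (List.dropWhile PySem.Chars.isspace s) [] acc
      = PySem.Chars.split₀.go s [] acc := by
  induction s with
  | nil => intro acc; rfl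
  | cons c rest ih =>
    intro acc
    by_cases hc : PySem.Chars.isspace c
    · rw [List.dropWhile_cons_of_pos hc, ih]
      simp only [PySem.Chars.split₀.go, hc, List.isEmpty_nil, if_pos]
    · rw [List.dropWhile_cons_of_neg (by simp [hc])]

theorem pvSplit₀_strip (s : List Char) :
    PySem.Chars.split₀ (PySem.Chars.strip s) = PySem.Chars.split₀ s := by
  unfold PySem.Chars.strip PySem.Chars.rstrip PySem.Chars.lstrip
  unfold PySem.Chars.split₀
  have hdecomp : List.dropWhile PySem.Chars.isspace s
      = (List.dropWhile PySem.Chars.isspace (List.dropWhile PySem.Chars.isspace s).reverse).reverse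
        ++ (List.takeWhile PySem.Chars.isspace (List.dropWhile PySem.Chars.isspace s).reverse).reverse := by
    conv_lhs => rw [← List.reverse_reverse (List.dropWhile PySem.Chars.isspace s),
      ← List.takeWhile_append_dropWhile (p := PySem.Chars.isspace)
        (l := (List.dropWhile PySem.Chars.isspace s).reverse)]
    rw [List.reverse_append]
  rw [← pvGo_lstrip s []]
  conv_rhs => rw [hdecomp]
  rw [pvGo_append_space]
  intro c hc
  exact List.mem_takeWhile_imp (List.mem_reverse.mp hc)

-- ---- lower distributes over the space-join ----
theorem pvLower_join (ws : List (List Char)) :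
    PySem.Chars.lower (PySem.Chars.join [' '] ws)
      = PySem.Chars.join [' '] (ws.map PySem.Chars.lower) := by
  induction ws with
  | nil => simp [PySem.Chars.join, PySem.Chars.lower, List.intercalate]
  | cons w ws ih =>
    cases ws with
    | nil => simp [PySem.Chars.join_singleton]
    | cons v vs =>
      rw [PySem.Chars.join_cons_cons]
      simp only [List.map_cons]
      rw [PySem.Chars.join_cons_cons]
      rw [← List.map_cons (f := PySem.Chars.lower) (a := v) (l := vs)]
      rw [← ih]
      simp [PySem.Chars.lower, List.map_append,
        show PySem.Chars.lowerChar ' ' = ' ' from by decide]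

theorem pvLowerChar_ne_space (c : Char) (h : PySem.Chars.isspace c = false) :
    PySem.Chars.lowerChar c ≠ ' ' := by
  unfold PySem.Chars.lowerChar
  by_cases hu : PySem.Chars.isupper c
  · simp only [hu, if_true]
    unfold PySem.Chars.isupper at hu
    rw [Bool.and_eq_true, decide_eq_true_eq, decide_eq_true_eq] at hu
    have hA : (65 : Nat) ≤ c.toNat := hu.1
    have hZ : c.toNat ≤ 90 := hu.2
    intro hcontra
    have h32 : (Char.ofNat (c.toNat + 32)).toNat = ' '.toNat := by rw [hcontra]
    rw [Char.toNat_ofNat] at h32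
    have hv : (c.toNat + 32).isValidChar := by left; omega
    rw [if_pos hv] at h32
    have : ' '.toNat = 32 := by decide
    omega
  · simp only [hu, Bool.false_eq_true, if_false]
    intro hcontra
    subst hcontra
    simp [PySem.Chars.isspace] at h

theorem pvGood_low (s : List Char) :
    pvGoodList ((PySem.Chars.split₀ s).map PySem.Chars.lower) := by
  intro w' hw'
  rcases List.mem_map.mp hw' with ⟨w, hw, rfl⟩
  obtain ⟨hne, hns⟩ := pvSplit₀_words s w hw
  constructor
  · simpa [PySem.Chars.lower, List.map_eq_nil_iff] using hne
  · intro c hc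
    rcases List.mem_map.mp hc with ⟨d, hd, rfl⟩
    exact pvLowerChar_ne_space d (hns d hd)

-- ---- word-boundary prefix lemmas ----
theorem pvL2 (u : List Char) (rest : List Char) : ∀ (w : List Char), pvSF u → pvSF w →
    ¬ (u ++ ' ' :: rest) <+: w := by
  induction u with
  | nil =>
    intro w _ hw h
    cases w with
    | nil => simp at h
    | cons c cs =>
      rw [List.nil_append, List.cons_prefix_cons] at h
      exact hw c (by simp) h.1.symm
  | cons x xs ih =>
    intro w hu hw h
    cases w with
    | nil => simp at h
    | cons c cs =>
      rw [List.cons_append, List.cons_prefix_cons] at h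
      exact ih cs (fun d hd => hu d (by simp [hd])) (fun d hd => hw d (by simp [hd])) h.2

theorem pvL1 (u : List Char) (rest : List Char) : ∀ (w r' : List Char), pvSF u → pvSF w →
    ((u ++ ' ' :: rest) <+: (w ++ ' ' :: r') ↔ (w = u ∧ rest <+: r')) := by
  induction u with
  | nil =>
    intro w r' _ hw
    cases w with
    | nil => simp
    | cons c cs =>
      simp only [List.nil_append, List.cons_append, List.cons_prefix_cons]
      constructor
      · rintro ⟨h1, _⟩; exact absurd h1.symm (hw c (by simp))
      · rintro ⟨h, _⟩; simp at h
  | cons x xs ih =>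
    intro w r' hu hw
    cases w with
    | nil =>
      simp only [List.cons_append, List.nil_append, List.cons_prefix_cons]
      constructor
      · rintro ⟨h1, _⟩; exact absurd h1 (hu x (by simp))
      · rintro ⟨h, _⟩; simp at h
    | cons c cs =>
      simp only [List.cons_append, List.cons_prefix_cons]
      rw [ih cs r' (fun d hd => hu d (by simp [hd])) (fun d hd => hw d (by simp [hd]))]
      constructor
      · rintro ⟨h1, h2, h3⟩; exact ⟨by simp [h1.symm, h2], h3⟩
      · rintro ⟨h, h3⟩
        rw [List.cons_eq_cons] at h
        exact ⟨h.1.symm, h.2, h3⟩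

theorem pvL3 (b : List Char) : ∀ (w r' : List Char), pvSF b →
    ((b <+: w ++ ' ' :: r') ↔ b <+: w) := by
  induction b with
  | nil => intro w r' _; simp
  | cons x xs ih =>
    intro w r' hb
    cases w with
    | nil =>
      simp only [List.nil_append, List.cons_prefix_cons]
      constructor
      · rintro ⟨h1, _⟩; exact absurd h1 (hb x (by simp))
      · intro h; simp at h
    | cons c cs =>
      simp only [List.cons_append, List.cons_prefix_cons]
      rw [ih cs r' (fun d hd => hb d (by simp [hd]))]

theorem pvL4 (b : List Char) (r : List Char) : ∀ (w : List Char), pvSF w →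
    ((' ' :: b) <:+: (w ++ r) ↔ (' ' :: b) <:+: r) := by
  intro w
  induction w with
  | nil => intro _; simp
  | cons c cs ih =>
    intro hw
    rw [List.cons_append, List.infix_cons_iff, ih (fun d hd => hw d (by simp [hd]))]
    constructor
    · rintro (h | h)
      · rw [List.cons_prefix_cons] at h
        exact absurd h.1.symm (hw c (by simp))
      · exact h
    · intro h; exact Or.inr h

-- ---- the padded joined string ----
def pvPad (ws : List (List Char)) : List Char := (ws.map (fun w => ' ' :: w)).flatten ++ [' ']

theorem pvPad_cons (w : List Char) (ws : List (List Char)) :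
    pvPad (w :: ws) = ' ' :: (w ++ pvPad ws) := by
  simp [pvPad]

theorem pvPad_shape (ws : List (List Char)) :
    pvPad ws = ' ' :: (pvPad ws).tail := by
  cases ws with
  | nil => rfl
  | cons w vs => rw [pvPad_cons]; rfl

theorem pvPad_eq (ws : List (List Char)) (h : ws ≠ []) :
    [' '] ++ PySem.Chars.join [' '] ws ++ [' '] = pvPad ws := by
  induction ws with
  | nil => exact absurd rfl h
  | cons w vs ih =>
    cases vs with
    | nil => simp [PySem.Chars.join_singleton, pvPad]
    | cons v vs' =>
      rw [PySem.Chars.join_cons_cons, pvPad_cons, ← ih (by simp)]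
      simp

-- ---- adjacency predicate, its zip form, and a monotonicity form ----
def pvAdj (P : List Char → List Char → Prop) : List (List Char) → Prop
  | [] => False
  | [_] => False
  | w :: z :: ws => P w z ∨ pvAdj P (z :: ws)

theorem pvAdj_zip (f : List Char × List Char → Bool) (low : List (List Char)) :
    ((low.zip low.tail).any f = true) ↔ pvAdj (fun w z => f (w, z) = true) low := by
  match low with
  | [] => simp [pvAdj]
  | [w] => simp [pvAdj]
  | w :: z :: ws =>
    rw [show (w :: z :: ws).tail = z :: ws from rfl, List.zip_cons_cons, List.any_cons]
    show _ ↔ pvAdj _ (w :: z :: ws)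
    rw [pvAdj]
    rw [Bool.or_eq_true, ← pvAdj_zip f (z :: ws)]
    rfl

theorem pvAdj_imp (P Q : List Char → List Char → Prop) (h : ∀ w z, P w z → Q w z) :
    ∀ low, pvAdj P low → pvAdj Q low := by
  intro low
  match low with
  | [] => exact fun hf => hf.elim
  | [w] => exact fun hf => hf.elim
  | w :: z :: ws =>
    intro hp
    rw [pvAdj] at hp ⊢
    rcases hp with hp | hp
    · exact Or.inl (h w z hp)
    · exact Or.inr (pvAdj_imp P Q h (z :: ws) hp)

theorem pvAdj_or (P Q : List Char → List Char → Prop) :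
    ∀ low, pvAdj (fun w z => P w z ∨ Q w z) low → pvAdj P low ∨ pvAdj Q low := by
  intro low
  match low with
  | [] => exact fun hf => hf.elim
  | [w] => exact fun hf => hf.elim
  | w :: z :: ws =>
    intro hp
    rw [pvAdj] at hp
    rcases hp with (hp | hp) | hp
    · exact Or.inl (Or.inl hp)
    · exact Or.inr (Or.inl hp)
    · rcases pvAdj_or P Q (z :: ws) hp with h | h
      · exact Or.inl (Or.inr h)
      · exact Or.inr (Or.inr h)

-- ---- token characterizations ----
theorem pvTok_word (word : List Char) (hw : word ≠ [] ∧ pvSF word) :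
    ∀ low, pvGoodList low →
    ((' ' :: (word ++ [' '])) <:+: pvPad low ↔ word ∈ low) := by
  intro low
  induction low with
  | nil =>
    intro _
    simp only [List.not_mem_nil, iff_false]
    intro h
    have := h.length_le
    simp [pvPad] at this
  | cons w ws ih =>
    intro hgood
    have hwsf : pvSF w := (hgood w (by simp)).2
    have hgood' : pvGoodList ws := fun v hv => hgood v (by simp [hv])
    rw [pvPad_cons, List.infix_cons_iff, List.mem_cons]
    have hpre : (' ' :: (word ++ [' '])) <+: ' ' :: (w ++ pvPad ws) ↔ word = w := by
      rw [List.cons_prefix_cons]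
      simp only [true_and]
      rw [pvPad_shape ws]
      rw [show (word ++ [' '] : List Char) = word ++ ' ' :: [] from rfl]
      rw [pvL1 word [] w (pvPad ws).tail hw.2 hwsf]
      simp [eq_comm]
    rw [hpre, pvL4 (word ++ [' ']) (pvPad ws) w hwsf, ih hgood']

theorem pvTok_pair (u v : List Char) (hu : pvSF u) (hv : pvSF v) :
    ∀ low, pvGoodList low →
    ((' ' :: (u ++ ' ' :: (v ++ [' ']))) <:+: pvPad low
      ↔ pvAdj (fun w z => w = u ∧ z = v) low) := by
  intro low
  induction low with
  | nil =>
    intro _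
    simp only [pvAdj, iff_false]
    intro h
    have := h.length_le
    simp [pvPad] at this
  | cons w ws ih =>
    intro hgood
    have hwsf : pvSF w := (hgood w (by simp)).2
    have hgood' : pvGoodList ws := fun z hz => hgood z (by simp [hz])
    rw [pvPad_cons, List.infix_cons_iff]
    have hpre : (' ' :: (u ++ ' ' :: (v ++ [' ']))) <+: ' ' :: (w ++ pvPad ws)
        ↔ (w = u ∧ ∃ z zs, ws = z :: zs ∧ z = v) := by
      rw [List.cons_prefix_cons]
      simp only [true_and]
      rw [pvPad_shape ws]
      rw [pvL1 u (v ++ [' ']) w (pvPad ws).tail hu hwsf]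
      constructor
      · rintro ⟨h1, h2⟩
        refine ⟨h1, ?_⟩
        cases ws with
        | nil =>
          exfalso
          rw [show (pvPad ([] : List (List Char))).tail = [] from rfl] at h2
          simp at h2
        | cons z zs =>
          rw [show (pvPad (z :: zs)).tail = z ++ pvPad zs from by rw [pvPad_cons]; rfl ] at h2
          rw [pvPad_shape zs] at h2
          have : v ++ ' ' :: [] <+: z ++ ' ' :: (pvPad zs).tail := by simpa using h2
          rw [pvL1 v [] z (pvPad zs).tail hv (hgood' z (by simp)).2] at this
          exact ⟨z, zs, rfl, this.1⟩
      · rintro ⟨h1, z, zs, hws, hz⟩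
        subst hws; subst hz
        refine ⟨h1, ?_⟩
        rw [show (pvPad (z :: zs)).tail = z ++ pvPad zs from by rw [pvPad_cons]; rfl ]
        rw [pvPad_shape zs]
        have : z ++ ' ' :: [] <+: z ++ ' ' :: (pvPad zs).tail := by
          rw [pvL1 z [] z (pvPad zs).tail (hgood' z (by simp)).2 (hgood' z (by simp)).2]; simp
        simpa using this
    rw [hpre, pvL4 (u ++ ' ' :: (v ++ [' '])) (pvPad ws) w hwsf, ih hgood']
    cases ws with
    | nil =>
      simp only [pvAdj]
      constructor
      · rintro (⟨_, z, zs, h, _⟩ | h)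
        · simp at h
        · exact h.elim
      · exact fun h => h.elim
    | cons z zs =>
      show _ ↔ pvAdj _ (w :: z :: zs)
      rw [pvAdj]
      constructor
      · rintro (⟨h1, z', zs', hzz, h2⟩ | h)
        · rw [List.cons_eq_cons] at hzz
          exact Or.inl ⟨h1, hzz.1 ▸ h2⟩
        · exact Or.inr h
      · rintro (⟨h1, h2⟩ | h)
        · exact Or.inl ⟨h1, z, zs, rfl, h2⟩
        · exact Or.inr h

theorem pvTok_callapoc : ∀ low, pvGoodList low →
    ((' ' :: ("call".toList ++ ' ' :: "apoc.".toList)) <:+: pvPad low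
      ↔ pvAdj (fun w z => w = "call".toList ∧ "apoc.".toList <+: z) low) := by
  intro low
  induction low with
  | nil =>
    intro _
    simp only [pvAdj, iff_false]
    intro h
    have := h.length_le
    simp [pvPad] at this
  | cons w ws ih =>
    intro hgood
    have hwsf : pvSF w := (hgood w (by simp)).2
    have hgood' : pvGoodList ws := fun z hz => hgood z (by simp [hz])
    rw [pvPad_cons, List.infix_cons_iff]
    have hpre : (' ' :: ("call".toList ++ ' ' :: "apoc.".toList)) <+: ' ' :: (w ++ pvPad ws)
        ↔ (w = "call".toList ∧ ∃ z zs, ws = z :: zs ∧ "apoc.".toList <+: z) := by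
      rw [List.cons_prefix_cons]
      simp only [true_and]
      rw [pvPad_shape ws]
      rw [pvL1 "call".toList "apoc.".toList w (pvPad ws).tail (pvSF_of_all _ (by decide)) hwsf]
      constructor
      · rintro ⟨h1, h2⟩
        refine ⟨h1, ?_⟩
        cases ws with
        | nil =>
          exfalso
          rw [show (pvPad ([] : List (List Char))).tail = [] from rfl] at h2
          simp at h2
        | cons z zs =>
          rw [show (pvPad (z :: zs)).tail = z ++ pvPad zs from by rw [pvPad_cons]; rfl ] at h2
          rw [pvPad_shape zs] at h2
          rw [pvL3 "apoc.".toList z (pvPad zs).tail (pvSF_of_all _ (by decide))] at h2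
          exact ⟨z, zs, rfl, h2⟩
      · rintro ⟨h1, z, zs, hws, hz⟩
        subst hws
        refine ⟨h1, ?_⟩
        rw [show (pvPad (z :: zs)).tail = z ++ pvPad zs from by rw [pvPad_cons]; rfl ]
        rw [pvPad_shape zs]
        rw [pvL3 "apoc.".toList z (pvPad zs).tail (pvSF_of_all _ (by decide))]
        exact hz
    rw [hpre, pvL4 ("call".toList ++ ' ' :: "apoc.".toList) (pvPad ws) w hwsf, ih hgood']
    cases ws with
    | nil =>
      simp only [pvAdj]
      constructor
      · rintro (⟨_, z, zs, h, _⟩ | h)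
        · simp at h
        · exact h.elim
      · exact fun h => h.elim
    | cons z zs =>
      show _ ↔ pvAdj _ (w :: z :: zs)
      rw [pvAdj]
      constructor
      · rintro (⟨h1, z', zs', hzz, h2⟩ | h)
        · rw [List.cons_eq_cons] at hzz
          exact Or.inl ⟨h1, hzz.1 ▸ h2⟩
        · exact Or.inr h
      · rintro (⟨h1, h2⟩ | h)
        · exact Or.inl ⟨h1, z, zs, rfl, h2⟩
        · exact Or.inr h

-- ---- start-of-query characterizations ----
theorem pvStart_word (p : List Char) (hp : pvSF p) (hne : p ≠ []) :
    ∀ low, pvGoodList low →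
    (p <+: PySem.Chars.join [' '] low ↔ ∃ w ws, low = w :: ws ∧ p <+: w) := by
  intro low hgood
  cases low with
  | nil =>
    simp [PySem.Chars.join, List.intercalate, List.prefix_nil, hne]
  | cons w ws =>
    cases ws with
    | nil =>
      rw [PySem.Chars.join_singleton]
      constructor
      · intro h; exact ⟨w, [], rfl, h⟩
      · rintro ⟨w', ws', heq, h⟩
        rw [List.cons_eq_cons] at heq
        exact heq.1 ▸ h
    | cons z zs =>
      rw [PySem.Chars.join_cons_cons, List.append_assoc, List.singleton_append]
      rw [pvL3 p w (PySem.Chars.join [' '] (z :: zs)) hp]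
      constructor
      · intro h; exact ⟨w, z :: zs, rfl, h⟩
      · rintro ⟨w', ws', heq, h⟩
        rw [List.cons_eq_cons] at heq
        exact heq.1 ▸ h

theorem pvStart_opt : ∀ low, pvGoodList low →
    ("optional match".toList <+: PySem.Chars.join [' '] low
      ↔ ∃ w z ws, low = w :: z :: ws ∧ w = "optional".toList ∧ "match".toList <+: z) := by
  intro low hgood
  have hsplit : "optional match".toList = "optional".toList ++ ' ' :: "match".toList := by decide
  cases low with
  | nil =>
    simp only [PySem.Chars.join, List.intercalate, List.intersperse_nil, List.flatten_nil]
    simp [List.prefix_nil]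
  | cons w ws =>
    have hwsf : pvSF w := (hgood w (by simp)).2
    cases ws with
    | nil =>
      rw [PySem.Chars.join_singleton, hsplit]
      constructor
      · intro h
        exact absurd h (pvL2 "optional".toList ("match".toList) w (pvSF_of_all _ (by decide)) hwsf)
      · rintro ⟨w', z', ws', heq, _⟩
        simp at heq
    | cons z zs =>
      rw [PySem.Chars.join_cons_cons, List.append_assoc, List.singleton_append, hsplit]
      rw [pvL1 "optional".toList ("match".toList) w (PySem.Chars.join [' '] (z :: zs))
        (pvSF_of_all _ (by decide)) hwsf]
      have hiff : ("match".toList <+: PySem.Chars.join [' '] (z :: zs)) ↔ "match".toList <+: z := by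
        rw [pvStart_word "match".toList (pvSF_of_all _ (by decide)) (by decide) (z :: zs)
          (fun v hv => hgood v (by simp [List.mem_cons] at hv ⊢; tauto))]
        constructor
        · rintro ⟨w', ws', heq, h⟩
          rw [List.cons_eq_cons] at heq
          exact heq.1 ▸ h
        · intro h; exact ⟨z, zs, rfl, h⟩
      rw [hiff]
      constructor
      · rintro ⟨h1, h2⟩; exact ⟨w, z, zs, rfl, h1, h2⟩
      · rintro ⟨w', z', ws', heq, h1, h2⟩
        simp only [List.cons_eq_cons] at heq
        obtain ⟨hw, hz', _⟩ := heq
        exact ⟨hw.trans h1, hz' ▸ h2⟩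

-- ---- assembly ----
theorem pvMain (query : String) (hpre : Pre_ensure_read_only_cypher query) :
    ensure_read_only_cypher query = ensure_read_only_cypher_alt query := by
  unfold Pre_ensure_read_only_cypher at hpre
  simp only [List.all_cons, List.all_nil, Bool.and_eq_true, Bool.not_eq_true', and_true] at hpre
  obtain ⟨⟨h1, h2, h3, h4, h5, h6, h7, h8, h9, h10⟩, hstart⟩ := hpre
  have hjoin := pvLower_join (PySem.Chars.split₀ (PySem.Chars.strip query.toList))
  -- abbreviations
  have hgood : pvGoodList ((PySem.Chars.split₀ (PySem.Chars.strip query.toList)).map PySem.Chars.lower) :=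
    pvGood_low _
  have hstartJ := hstart
  rw [hjoin] at hstartJ
  have hne : (PySem.Chars.split₀ (PySem.Chars.strip query.toList)).map PySem.Chars.lower ≠ [] := by
    intro h
    rw [h] at hstartJ
    exact absurd hstartJ (by decide)
  have hpad := pvPad_eq _ hne
  -- A returns the normalized string
  have hAcond : pvForbiddenA.any (fun t => PySem.Chars.isIn t
      ([' '] ++ PySem.Chars.lower (PySem.Chars.join [' ']
        (PySem.Chars.split₀ (PySem.Chars.strip query.toList))) ++ [' '])) = false := by
    simp only [pvForbiddenA, List.any_cons, List.any_nil,
      h1, h2, h3, h4, h5, h6, h7, h8, h9, h10, Bool.or_self]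
  have hA : ensure_read_only_cypher query
      = String.ofList (PySem.Chars.join [' '] (PySem.Chars.split₀ (PySem.Chars.strip query.toList))) := by
    unfold ensure_read_only_cypher
    simp only [hAcond, Bool.false_eq_true, if_false, hstart, Bool.not_true]
  -- facts for the B side
  rw [hjoin] at h1 h2 h3 h4 h5 h6 h7 h8 h9 h10
  rw [PySem.Chars.isIn_eq_false_iff] at h1 h2 h3 h4 h5 h6 h7 h8 h9 h10
  rw [hpad] at h1 h2 h3 h4 h5 h6 h7 h8 h9 h10
  -- B's single-word scan finds nothing
  have hBwords : (((PySem.Chars.split₀ (PySem.Chars.strip query.toList)).map PySem.Chars.lower).any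
      (fun w => pvForbiddenWords.contains w)) = false := by
    rw [Bool.eq_false_iff]
    intro hany
    obtain ⟨w, hwmem, hcont⟩ := List.any_eq_true.mp hany
    rw [List.contains_iff_mem] at hcont
    simp only [pvForbiddenWords, List.mem_cons, List.not_mem_nil, or_false] at hcont
    rcases hcont with h | h | h | h | h | h | h <;> subst h
    · refine h1 ?_
      rw [show (" create ".toList : List Char) = ' ' :: ("create".toList ++ [' ']) from by decide]
      exact (pvTok_word "create".toList ⟨by decide, pvSF_of_all _ (by decide)⟩ _ hgood).mpr hwmem
    · refine h2 ?_
      rw [show (" merge ".toList : List Char) = ' ' :: ("merge".toList ++ [' ']) from by decide]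
      exact (pvTok_word "merge".toList ⟨by decide, pvSF_of_all _ (by decide)⟩ _ hgood).mpr hwmem
    · refine h3 ?_
      rw [show (" delete ".toList : List Char) = ' ' :: ("delete".toList ++ [' ']) from by decide]
      exact (pvTok_word "delete".toList ⟨by decide, pvSF_of_all _ (by decide)⟩ _ hgood).mpr hwmem
    · refine h4 ?_
      rw [show (" detach ".toList : List Char) = ' ' :: ("detach".toList ++ [' ']) from by decide]
      exact (pvTok_word "detach".toList ⟨by decide, pvSF_of_all _ (by decide)⟩ _ hgood).mpr hwmem
    · refine h5 ?_
      rw [show (" set ".toList : List Char) = ' ' :: ("set".toList ++ [' ']) from by decide]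
      exact (pvTok_word "set".toList ⟨by decide, pvSF_of_all _ (by decide)⟩ _ hgood).mpr hwmem
    · refine h6 ?_
      rw [show (" remove ".toList : List Char) = ' ' :: ("remove".toList ++ [' ']) from by decide]
      exact (pvTok_word "remove".toList ⟨by decide, pvSF_of_all _ (by decide)⟩ _ hgood).mpr hwmem
    · refine h7 ?_
      rw [show (" drop ".toList : List Char) = ' ' :: ("drop".toList ++ [' ']) from by decide]
      exact (pvTok_word "drop".toList ⟨by decide, pvSF_of_all _ (by decide)⟩ _ hgood).mpr hwmem
  -- B's pair scan finds nothing
  have hBpairs : ((((PySem.Chars.split₀ (PySem.Chars.strip query.toList)).map PySem.Chars.lower).zip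
      ((PySem.Chars.split₀ (PySem.Chars.strip query.toList)).map PySem.Chars.lower).tail).any
      (fun p => pvForbiddenPairs.contains p
        || (p.1 == "call".toList && PySem.Chars.startswith p.2 "apoc.".toList))) = false := by
    rw [Bool.eq_false_iff]
    intro hany
    rw [pvAdj_zip] at hany
    have himp : ∀ (w z : List Char),
        ((pvForbiddenPairs.contains (w, z)
          || (w == "call".toList && PySem.Chars.startswith z "apoc.".toList)) = true) →
        (((w = "load".toList ∧ z = "csv".toList) ∨ (w = "call".toList ∧ z = "dbms".toList))
          ∨ (w = "call".toList ∧ "apoc.".toList <+: z)) := by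
      intro w z hp
      simp only [pvForbiddenPairs, Bool.or_eq_true, Bool.and_eq_true, beq_iff_eq,
        List.contains_cons, List.contains_nil, Bool.or_false, Prod.mk.injEq] at hp
      rcases hp with (⟨hl, hr⟩ | ⟨hl, hr⟩) | ⟨hl, hr⟩
      · exact Or.inl (Or.inl ⟨hl, hr⟩)
      · exact Or.inl (Or.inr ⟨hl, hr⟩)
      · exact Or.inr ⟨hl, (PySem.Chars.startswith_iff _ _).mp hr⟩
    have hadj := pvAdj_imp _ _ himp _ hany
    rcases pvAdj_or _ _ _ hadj with hadj' | hadj'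
    · rcases pvAdj_or _ _ _ hadj' with hadj'' | hadj''
      · refine h8 ?_
        rw [show (" load csv ".toList : List Char)
          = ' ' :: ("load".toList ++ ' ' :: ("csv".toList ++ [' '])) from by decide]
        exact (pvTok_pair "load".toList "csv".toList
          (pvSF_of_all _ (by decide)) (pvSF_of_all _ (by decide)) _ hgood).mpr hadj''
      · refine h9 ?_
        rw [show (" call dbms ".toList : List Char)
          = ' ' :: ("call".toList ++ ' ' :: ("dbms".toList ++ [' '])) from by decide]
        exact (pvTok_pair "call".toList "dbms".toList
          (pvSF_of_all _ (by decide)) (pvSF_of_all _ (by decide)) _ hgood).mpr hadj''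
    · refine h10 ?_
      rw [show (" call apoc.".toList : List Char)
        = ' ' :: ("call".toList ++ ' ' :: "apoc.".toList) from by decide]
      exact (pvTok_callapoc _ hgood).mpr hadj'
  -- B's start check passes: four cases of A's startswith
  rw [Bool.or_eq_true, Bool.or_eq_true, Bool.or_eq_true] at hstartJ
  rcases hstartJ with ((hs1 | hs2) | hs3) | hs4
  · -- match
    rw [PySem.Chars.startswith_iff] at hs1
    obtain ⟨w, ws, hlow_eq, hpw⟩ := (pvStart_word "match".toList
      (pvSF_of_all _ (by decide)) (by decide) _ hgood).mp hs1
    unfold ensure_read_only_cypher_alt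
    rw [← pvSplit₀_strip query.toList]
    rw [hlow_eq] at hBwords hBpairs
    rw [hA]
    simp only [hlow_eq, hBwords, Bool.false_eq_true, if_false, hBpairs,
      (PySem.Chars.startswith_iff w "match".toList).mpr hpw,
      Bool.true_or, Bool.not_true]
  · -- optional match
    rw [PySem.Chars.startswith_iff] at hs2
    obtain ⟨w, z, ws, hlow_eq, hw_opt, hpz⟩ := (pvStart_opt _ hgood).mp hs2
    subst hw_opt
    unfold ensure_read_only_cypher_alt
    rw [← pvSplit₀_strip query.toList]
    rw [hlow_eq] at hBwords hBpairs
    rw [hA]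
    simp only [hlow_eq, hBwords, Bool.false_eq_true, if_false, hBpairs,
      (PySem.Chars.startswith_iff z "match".toList).mpr hpz,
      beq_self_eq_true, Bool.true_and, Bool.or_true, Bool.not_true]
  · -- with
    rw [PySem.Chars.startswith_iff] at hs3
    obtain ⟨w, ws, hlow_eq, hpw⟩ := (pvStart_word "with".toList
      (pvSF_of_all _ (by decide)) (by decide) _ hgood).mp hs3
    unfold ensure_read_only_cypher_alt
    rw [← pvSplit₀_strip query.toList]
    rw [hlow_eq] at hBwords hBpairs
    rw [hA]
    simp only [hlow_eq, hBwords, Bool.false_eq_true, if_false, hBpairs,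
      (PySem.Chars.startswith_iff w "with".toList).mpr hpw,
      Bool.true_or, Bool.or_true, Bool.not_true]
  · -- call
    rw [PySem.Chars.startswith_iff] at hs4
    obtain ⟨w, ws, hlow_eq, hpw⟩ := (pvStart_word "call".toList
      (pvSF_of_all _ (by decide)) (by decide) _ hgood).mp hs4
    unfold ensure_read_only_cypher_alt
    rw [← pvSplit₀_strip query.toList]
    rw [hlow_eq] at hBwords hBpairs
    rw [hA]
    simp only [hlow_eq, hBwords, Bool.false_eq_true, if_false, hBpairs,
      (PySem.Chars.startswith_iff w "call".toList).mpr hpw,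
      Bool.true_or, Bool.or_true, Bool.not_true]

-- ===== VERDICT (by name: the statement is the Claim_ definition above) =====
theorem ensure_read_only_cypher_spec : Claim_equal_ensure_read_only_cypher := by
  intro query _ hpre
  unfold Spec_ensure_read_only_cypher
  exact pvMain query hpre
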